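-- pv_equiv track=rewrite | github.com/VsevolodIs/Isaev-Vsevolod-11-411-2sem | 26less.py | find_amount_of_ways
-- ===== SOURCE A (Python) =====
-- def find_amount_of_ways(n, k):
--     if n == 1:
--         return 1
--     elif n <= 0:
--         return 0
--
--     window = [1]
--     current_sum = 1
--     res = 0
--
--     for i in range(1, n):
--         dp_i = current_sum
--         res = dp_i
--
--         window.append(dp_i)
--         current_sum += dp_i
--
--         if len(window) > k:
--             del_am = window.pop(0)
--             current_sum -= del_am
--
--     return res
-- ===== SOURCE B (Python) =====
-- def find_amount_of_ways(n, k):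
--     if n == 1:
--         return 1
--     elif n <= 0:
--         return 0
--
--     kk = k if k > 1 else 1  # window of size <= 0 still keeps the element just appended, so k <= 1 behaves as 1
--     dp = [1, 1]
--     for i in range(2, n):
--         j = i - 1 - kk
--         dp.append(2 * dp[i - 1] - (dp[j] if j >= 0 else 0))
--     return dp[n - 1]
-- ===== Notes on version B (the rewrite author's own statement) =====
-- stated objective: alternative
-- what changed: Replaces the sliding-window list with add/pop-and-subtract bookkeeping by a doubling recurrence dp[i] = 2*dp[i-1] - dp[i-1-k] over a dp table, with no window list or running window sum.
import Mathlib
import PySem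

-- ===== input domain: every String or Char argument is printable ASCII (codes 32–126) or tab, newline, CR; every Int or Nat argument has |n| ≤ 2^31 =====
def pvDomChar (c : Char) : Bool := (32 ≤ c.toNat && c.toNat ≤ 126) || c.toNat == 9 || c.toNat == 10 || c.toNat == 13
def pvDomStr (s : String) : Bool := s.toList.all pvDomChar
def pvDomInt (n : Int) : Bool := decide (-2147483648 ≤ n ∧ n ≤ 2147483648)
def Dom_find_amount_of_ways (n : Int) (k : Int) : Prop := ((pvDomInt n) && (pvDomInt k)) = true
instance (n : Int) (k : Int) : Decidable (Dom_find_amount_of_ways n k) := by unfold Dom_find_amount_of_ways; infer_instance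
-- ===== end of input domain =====

-- B replaces A's sliding-window list (append / pop(0) / running window sum) by the doubling
-- recurrence dp[i] = 2*dp[i-1] - dp[i-1-k] over a dp table: an alternative decomposition, same cost.

-- ===== PORT A =====
def find_amount_of_ways (n : Int) (k : Int) : Int :=
  if n == 1 then 1
  else if n ≤ 0 then 0
  else
    let st := (PySem.List.pyRange 1 n 1).foldl
      (fun (s : List Int × Int × Int) _ =>
        let window := s.1
        let current_sum := s.2.1
        let dp_i := current_sum
        let res := dp_i
        let window := window ++ [dp_i]
        let current_sum := current_sum + dp_i
        if (window.length : Int) > k then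
          -- window.pop(0): window is nonempty here (an element was appended just above), so
          -- pop(0) returns the head and keeps the tail; the [] branch is unreachable
          match window with
          | [] => (window, current_sum, res)
          | del_am :: rest => (rest, current_sum - del_am, res)
        else (window, current_sum, res))
      ([1], 1, 0)
    st.2.2

-- ===== PORT B =====
def find_amount_of_ways_alt (n : Int) (k : Int) : Int :=
  if n == 1 then 1
  else if n ≤ 0 then 0
  else
    let kk := if k > 1 then k else 1
    let dp := (PySem.List.pyRange 2 n 1).foldl
      (fun (dp : List Int) i =>
        let j := i - 1 - kk
        -- dp[i-1] and dp[j] are always in range here (len(dp) = i and 0 ≤ j < i when taken),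
        -- so pyGetD with default 0 is exact
        dp ++ [2 * PySem.List.pyGetD dp (i - 1) 0 -
               (if j ≥ 0 then PySem.List.pyGetD dp j 0 else 0)])
      [1, 1]
    PySem.List.pyGetD dp (n - 1) 0

-- ===== PRECONDITION & SPEC =====
def Spec_find_amount_of_ways (n : Int) (k : Int) (out : Int) : Prop := out = find_amount_of_ways_alt n k
instance (n : Int) (k : Int) (out : Int) : Decidable (Spec_find_amount_of_ways n k out) := by unfold Spec_find_amount_of_ways; infer_instance

-- ===== CLAIM (what is proved, stated in full; the proofs are below) =====
def Claim_equal_find_amount_of_ways : Prop := ∀ (n : Int) (k : Int), Dom_find_amount_of_ways n k → Spec_find_amount_of_ways n k (find_amount_of_ways n k)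

-- ===== LEMMAS AND PROOFS =====

/-- The loop body of A's port, as a named step function (the loop body ignores the counter). -/
def stepA (k : Int) (s : List Int × Int × Int) : List Int × Int × Int :=
  let window := s.1
  let current_sum := s.2.1
  let dp_i := current_sum
  let res := dp_i
  let window := window ++ [dp_i]
  let current_sum := current_sum + dp_i
  if (window.length : Int) > k then
    match window with
    | [] => (window, current_sum, res)
    | del_am :: rest => (rest, current_sum - del_am, res)
  else (window, current_sum, res)

/-- The loop body of B's port. -/
def stepB (kk : Int) (dp : List Int) (i : Int) : List Int :=
  let j := i - 1 - kk
  dp ++ [2 * PySem.List.pyGetD dp (i - 1) 0 -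
         (if j ≥ 0 then PySem.List.pyGetD dp j 0 else 0)]

/-- B's dp table after processing i = 2 .. t+1, i.e. the list Python's `dp` holds when len(dp) = t+2. -/
def BL (kk : Int) : Nat → List Int
  | 0 => [1, 1]
  | t + 1 => stepB kk (BL kk t) ((t : Int) + 2)

lemma length_BL (kk : Int) : ∀ t, (BL kk t).length = t + 2 := by
  intro t
  induction t with
  | zero => rfl
  | succ t ih => simp [BL, stepB, ih]

lemma foldlB (kk : Int) : ∀ t : Nat, (PySem.List.pyRange 2 ((t : Int) + 2) 1).foldl (stepB kk) [1, 1] = BL kk t := by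
  intro t
  induction t with
  | zero => simp [PySem.List.pyRange_one_eq_nil, BL]
  | succ t ih =>
      have h : ((t : Int) + 1) + 2 = ((t : Int) + 2) + 1 := by ring
      rw [show (((t + 1 : Nat) : Int) + 2) = ((t : Int) + 2) + 1 by push_cast; ring,
          PySem.List.pyRange_one_succ_right (by omega)]
      simp [List.foldl_append, ih, BL]

lemma foldlA (k : Int) : ∀ (l : List Int) (s : List Int × Int × Int),
    l.foldl (fun s _ => stepA k s) s = (stepA k)^[l.length] s := by
  intro l
  induction l with
  | nil => intro s; rfl
  | cons x xs ih =>
      intro s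
      simp [List.foldl_cons, ih, Function.iterate_succ_apply]

/-- The main invariant: after t+1 iterations, A's state is determined by B's dp table. -/
lemma invariant (k kk : Int) (hkk : kk = if k > 1 then k else 1) : ∀ t : Nat,
    (stepA k)^[t + 1] ([1], 1, 0) =
      ((BL kk t).drop (t + 2 - kk.toNat),
       2 * (BL kk t).getD (t + 1) 0 -
         (if (t : Int) + 1 - kk ≥ 0 then (BL kk t).getD (t + 1 - kk.toNat) 0 else 0),
       (BL kk t).getD (t + 1) 0) := by
  intro t
  have hkk1 : 1 ≤ kk := by rw [hkk]; split <;> omega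
  have hK1 : 1 ≤ kk.toNat := by omega
  induction t with
  | zero =>
      by_cases hk : k > 1
      · have hkkk : kk = k := by rw [hkk]; simp [hk]
        have hK2 : 2 ≤ kk.toNat := by rw [hkkk]; omega
        have hc : ¬ ((2 : Int) > k) := by omega
        have hd : 0 + 2 - kk.toNat = 0 := by omega
        have hif : ¬ (kk ≤ 1) := by rw [hkkk]; omega
        simp [stepA, hc, BL, hd, hif]
      · have hkkk : kk = 1 := by rw [hkk]; simp [hk]
        have hc : ((2 : Int) > k) := by omega
        simp [stepA, hc, BL, hkkk]
  | succ t ih =>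
      rw [Function.iterate_succ_apply', ih]
      have hlen : (BL kk t).length = t + 2 := length_BL kk t
      have hlenE : (BL kk (t + 1)).length = t + 3 := length_BL kk (t + 1)
      -- abbreviations
      set D := BL kk t with hD
      set s : Int := 2 * D.getD (t + 1) 0 -
        (if (t : Int) + 1 - kk ≥ 0 then D.getD (t + 1 - kk.toNat) 0 else 0) with hs
      -- B's new table: the appended element is exactly s
      have hE : BL kk (t + 1) = D ++ [s] := by
        show stepB kk D ((t : Int) + 2) = D ++ [s]
        unfold stepB
        simp only
        congr 1
        have h1 : (t : Int) + 2 - 1 = ((t + 1 : Nat) : Int) := by push_cast; ring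
        rw [h1, PySem.List.pyGetD_natCast, hs]
        congr 1
        by_cases hj : (t : Int) + 1 - kk ≥ 0
        · have hc1 : ((t + 1 : Nat) : Int) - kk ≥ 0 := by push_cast; omega
          rw [if_pos hc1, if_pos hj]
          have h2 : ((t + 1 : Nat) : Int) - kk = ((t + 1 - kk.toNat : Nat) : Int) := by
            push_cast; omega
          rw [h2, PySem.List.pyGetD_natCast]
        · have hc1 : ¬ (((t + 1 : Nat) : Int) - kk ≥ 0) := by push_cast; omega
          rw [if_neg hc1, if_neg hj]
      -- A's step on the invariant state
      have hWlen : (D.drop (t + 2 - kk.toNat)).length = min kk.toNat (t + 2) := by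
        simp [hlen]; omega
      -- the window is nonempty
      have hWne : D.drop (t + 2 - kk.toNat) ≠ [] := by
        intro h
        have := congrArg List.length h
        simp [hWlen] at this
        omega
      set W := D.drop (t + 2 - kk.toNat) with hW
      show stepA k (W, s, D.getD (t + 1) 0) = _
      unfold stepA
      simp only
      -- the pop condition: (W.length + 1 : Int) > k ↔ kk.toNat ≤ t + 2
      have hWl2 : ((W ++ [s]).length : Int) = min kk.toNat (t + 2) + 1 := by
        simp [hWlen]
      by_cases hpop : kk.toNat ≤ t + 2
      · -- pop occurs
        have hcond : ((W ++ [s]).length : Int) > k := by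
          rw [hWl2]
          rw [hkk] at hpop ⊢
          split at hpop <;> split <;> push_cast <;> omega
        rw [if_pos hcond]
        -- W = D.getD (t+2-K) :: D.drop (t+3-K)
        have h1 : t + 2 - kk.toNat < D.length := by omega
        have hdropcons : W = D[t + 2 - kk.toNat] :: D.drop (t + 3 - kk.toNat) := by
          rw [hW, show t + 3 - kk.toNat = (t + 2 - kk.toNat) + 1 by omega]
          exact List.drop_eq_getElem_cons h1
        rw [hdropcons]
        simp only [List.cons_append]
        refine Prod.ext ?_ (Prod.ext ?_ ?_)
        · -- window component
          show D.drop (t + 3 - kk.toNat) ++ [s] = (BL kk (t + 1)).drop (t + 1 + 2 - kk.toNat)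
          rw [hE]
          rw [List.drop_append_of_le_length (by omega)]
        · -- sum component
          show s + s - D[t + 2 - kk.toNat] = _
          rw [hE]
          have hg1 : (D ++ [s]).getD (t + 1 + 1) 0 = s := by
            rw [List.getD_eq_getElem _ _ (by simp [hlen])]
            rw [List.getElem_append_right (by omega)]
            simp [hlen]
          have hcnd : ((t + 1 : Nat) : Int) + 1 - kk ≥ 0 := by push_cast; omega
          rw [hg1, if_pos hcnd]
          have hg2 : (D ++ [s]).getD (t + 1 + 1 - kk.toNat) 0 = D[t + 2 - kk.toNat] := by
            have hlt : t + 1 + 1 - kk.toNat < D.length := by omega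
            rw [List.getD_eq_getElem _ _ (by simp [hlen]),
                List.getElem_append_left hlt]
          rw [hg2]; ring
        · -- res component
          show s = (BL kk (t + 1)).getD (t + 1 + 1) 0
          rw [hE, List.getD_eq_getElem _ _ (by simp [hlen]),
              List.getElem_append_right (by omega)]
          simp [hlen]
      · -- no pop: kk.toNat ≥ t + 3, window keeps everything
        have hcond : ¬ (((W ++ [s]).length : Int) > k) := by
          rw [hWl2]
          rw [hkk] at hpop ⊢
          split at hpop <;> split <;> push_cast <;> omega
        rw [if_neg hcond]
        have hWD : W = D := by rw [hW, show t + 2 - kk.toNat = 0 by omega, List.drop_zero]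
        refine Prod.ext ?_ (Prod.ext ?_ ?_)
        · show W ++ [s] = (BL kk (t + 1)).drop (t + 1 + 2 - kk.toNat)
          rw [hE, hWD, show t + 1 + 2 - kk.toNat = 0 by omega, List.drop_zero]
        · show s + s = _
          rw [hE]
          have hg1 : (D ++ [s]).getD (t + 1 + 1) 0 = s := by
            rw [List.getD_eq_getElem _ _ (by simp [hlen]),
                List.getElem_append_right (by omega)]
            simp [hlen]
          have hcnd : ¬ (((t + 1 : Nat) : Int) + 1 - kk ≥ 0) := by push_cast; omega
          rw [hg1, if_neg hcnd]; ring
        · show s = (BL kk (t + 1)).getD (t + 1 + 1) 0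
          rw [hE, List.getD_eq_getElem _ _ (by simp [hlen]),
              List.getElem_append_right (by omega)]
          simp [hlen]

lemma portA_eq (n k : Int) (h1 : ¬ n = 1) (h0 : ¬ n ≤ 0) :
    find_amount_of_ways n k =
      ((PySem.List.pyRange 1 n 1).foldl (fun s _ => stepA k s) ([1], 1, 0)).2.2 := by
  unfold find_amount_of_ways stepA
  simp [h1, h0]

lemma portB_eq (n k : Int) (h1 : ¬ n = 1) (h0 : ¬ n ≤ 0) :
    find_amount_of_ways_alt n k =
      PySem.List.pyGetD
        ((PySem.List.pyRange 2 n 1).foldl (stepB (if k > 1 then k else 1)) [1, 1]) (n - 1) 0 := by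
  unfold find_amount_of_ways_alt stepB
  simp [h1, h0]

-- ===== VERDICT (by name: the statement is the Claim_ definition above) =====
theorem find_amount_of_ways_spec : Claim_equal_find_amount_of_ways := by
  intro n k _
  unfold Spec_find_amount_of_ways
  by_cases h1 : n = 1
  · simp [find_amount_of_ways, find_amount_of_ways_alt, h1]
  · by_cases h0 : n ≤ 0
    · simp [find_amount_of_ways, find_amount_of_ways_alt, h0, h1]
    · set kk : Int := if k > 1 then k else 1 with hkk
      obtain ⟨t, ht⟩ : ∃ t : Nat, n = (t : Int) + 2 := ⟨(n - 2).toNat, by omega⟩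
      subst ht
      rw [portA_eq _ _ h1 h0, portB_eq _ _ h1 h0, ← hkk]
      rw [foldlA, PySem.List.length_pyRange_one,
          show ((t : Int) + 2 - 1).toNat = t + 1 by omega,
          foldlB kk t, invariant k kk hkk t]
      simp only
      rw [show (t : Int) + 2 - 1 = ((t + 1 : Nat) : Int) by push_cast; ring,
          PySem.List.pyGetD_natCast]
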